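-- pv_equiv track=rewrite | github.com/naga0033/pokemon-champions-database | scripts/import-pokemon-rankings.py | infer_frame_start
-- ===== SOURCE A (Python) =====
-- def infer_frame_start(observed_ranks: list[int], row_count: int, max_rank: int = 500) -> int | None:
--     if not observed_ranks:
--         return None
--     best_start = None
--     best_score = -1
--     for start in range(1, max_rank - row_count + 2):
--         score = 0
--         for idx, observed in enumerate(observed_ranks[:row_count]):
--             expected = start + idx
--             if observed == expected:
--                 score += 3
--             elif str(expected).endswith(str(observed)):
--                 score += 1
--         if score > best_score:
--             best_score = score
--             best_start = start
--     return best_start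
-- ===== SOURCE B (Python) =====
-- def infer_frame_start(observed_ranks: list[int], row_count: int, max_rank: int = 500) -> int | None:
--     if not observed_ranks:
--         return None
--     hi = max_rank - row_count + 1          # candidate starts are 1..hi
--     if hi < 1:
--         return None
--     scores = [0] * hi                      # scores[s-1] = score of start s
--     for idx, observed in enumerate(observed_ranks[:row_count]):
--         if observed < 0:
--             continue                       # a positive expected value never matches
--         m = 10 ** len(str(observed))
--         # suffix match: (start + idx) % m == observed, i.e. start in an
--         # arithmetic progression with step m
--         first = (observed - idx - 1) % m + 1
--         for start in range(first, hi + 1, m):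
--             scores[start - 1] += 1
--         # exact match scores 3 instead of the 1 already added
--         s = observed - idx
--         if 1 <= s <= hi:
--             scores[s - 1] += 2
--     return scores.index(max(scores)) + 1
-- ===== Notes on version B (the rewrite author's own statement) =====
-- stated objective: alternative
-- what changed: Instead of scoring every candidate start by a fresh pass over the rows (nested loops with an endswith test per cell), B builds one score array in a single pass over the rows: each row adds its exact-match start directly and its suffix matches as an arithmetic progression start ≡ observed-idx (mod 10^digits), then returns the first index of the maximum.
import Mathlib
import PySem

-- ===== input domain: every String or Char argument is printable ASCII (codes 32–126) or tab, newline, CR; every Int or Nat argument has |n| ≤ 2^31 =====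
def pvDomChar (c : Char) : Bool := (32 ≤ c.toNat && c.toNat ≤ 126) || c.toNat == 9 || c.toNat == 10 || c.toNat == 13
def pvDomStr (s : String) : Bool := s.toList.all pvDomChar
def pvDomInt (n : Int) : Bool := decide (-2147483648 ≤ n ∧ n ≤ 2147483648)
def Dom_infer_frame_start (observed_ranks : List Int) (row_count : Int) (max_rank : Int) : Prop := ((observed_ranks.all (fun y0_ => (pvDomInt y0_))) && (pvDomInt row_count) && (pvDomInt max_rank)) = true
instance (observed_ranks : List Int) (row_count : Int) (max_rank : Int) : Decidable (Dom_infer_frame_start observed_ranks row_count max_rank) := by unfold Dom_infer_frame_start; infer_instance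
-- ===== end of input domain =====

-- Alternative algorithm: instead of A's per-start rescan (every candidate start scored by a fresh
-- pass over all rows), B builds a single score array — each row adds its exact-match start and its
-- suffix matches as an arithmetic progression (start ≡ observed - idx mod 10^digits) — and then
-- returns the first index of the maximum.



-- ===== PORT A =====
-- literal transliteration of A: for each candidate start scan all rows, keep the running best
def infer_frame_start (observed_ranks : List Int) (row_count : Int) (max_rank : Int) : Option Int :=
  if observed_ranks = [] then none
  else
    ((PySem.List.pyRange 1 (max_rank - row_count + 2) 1).foldl
      (fun (best : Option Int × Int) (start : Int) =>
        let score : Int :=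
          (PySem.List.enumerate (PySem.List.slice observed_ranks none (some row_count)) 0).foldl
            (fun (sc : Int) (p : Int × Int) =>
              let expected := start + p.1
              if p.2 = expected then sc + 3
              else if PySem.Str.endswith (PySem.Int.toStr expected) (PySem.Int.toStr p.2) then sc + 1
              else sc) 0
        if score > best.2 then (some start, score) else best)
      (none, -1)).1

-- ===== PORT B =====
-- literal transliteration of B (Source B): one score array, each row adds its suffix-match
-- arithmetic progression and its exact-match bonus; answer = first index of the maximum
def infer_frame_start_alt (observed_ranks : List Int) (row_count : Int) (max_rank : Int) : Option Int :=
  if observed_ranks = [] then none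
  else
    let hi := max_rank - row_count + 1
    if hi < 1 then none
    else
      let scores : List Int :=
        (PySem.List.enumerate (PySem.List.slice observed_ranks none (some row_count)) 0).foldl
          (fun (scores : List Int) (p : Int × Int) =>
            if p.2 < 0 then scores
            else
              let m : Int := 10 ^ (PySem.Str.len (PySem.Int.toStr p.2)).toNat
              let first := PySem.Int.mod (p.2 - p.1 - 1) m + 1
              let scores1 := (PySem.List.pyRange first (hi + 1) m).foldl
                (fun (sc : List Int) (start : Int) => sc.modify (start - 1).toNat (· + 1)) scores
              let s := p.2 - p.1
              if 1 ≤ s ∧ s ≤ hi then scores1.modify (s - 1).toNat (· + 2) else scores1)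
          (List.replicate hi.toNat 0)
      match PySem.List.max? scores (fun x => x) with
      | none => none
      | some mx =>
        match PySem.List.index? scores mx with
        | none => none
        | some i => some ((i : Int) + 1)

-- ===== PRECONDITION & SPEC =====
def Spec_infer_frame_start (observed_ranks : List Int) (row_count : Int) (max_rank : Int) (out : Option Int) : Prop := out = infer_frame_start_alt observed_ranks row_count max_rank
instance (observed_ranks : List Int) (row_count : Int) (max_rank : Int) (out : Option Int) : Decidable (Spec_infer_frame_start observed_ranks row_count max_rank out) := by unfold Spec_infer_frame_start; infer_instance

-- ===== CLAIM (what is proved, stated in full; the proofs are below) =====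
def Claim_equal_infer_frame_start : Prop := ∀ (observed_ranks : List Int) (row_count : Int) (max_rank : Int), Dom_infer_frame_start observed_ranks row_count max_rank → Spec_infer_frame_start observed_ranks row_count max_rank (infer_frame_start observed_ranks row_count max_rank)


-- ===== LEMMAS AND PROOFS =====

/- ---- decimal-string layer: `str(e).endswith(str(o))` is a modular condition ---- -/

lemma pvToDigitsCore_eq_digits : ∀ (f n : Nat) (acc : List Char), 0 < n → n ≤ f →
    Nat.toDigitsCore 10 f n acc = ((Nat.digits 10 n).map Nat.digitChar).reverse ++ acc := by
  intro f
  induction f with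
  | zero => intro n acc hn hf; omega
  | succ f ih =>
    intro n acc hn hf
    rw [Nat.toDigitsCore]
    by_cases h : n / 10 = 0
    · simp only [h, if_true]
      rw [Nat.digits_def' (by norm_num : (1:Nat) < 10) hn, h]
      simp
    · simp only [h, if_false]
      have hlt : n / 10 < n := Nat.div_lt_self hn (by norm_num)
      rw [ih (n / 10) _ (Nat.pos_of_ne_zero h) (by omega)]
      rw [Nat.digits_def' (by norm_num : (1:Nat) < 10) hn]
      simp

lemma pvToDigits_eq_digits (n : Nat) (h : 0 < n) :
    Nat.toDigits 10 n = ((Nat.digits 10 n).map Nat.digitChar).reverse := by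
  rw [Nat.toDigits, pvToDigitsCore_eq_digits (n + 1) n [] h (by omega), List.append_nil]

lemma pvDigitChar_inj (a b : Nat) (ha : a < 10) (hb : b < 10)
    (h : Nat.digitChar a = Nat.digitChar b) : a = b := by
  revert h; interval_cases a <;> interval_cases b <;> decide

lemma pvMap_digitChar_inj : ∀ (l1 l2 : List Nat), (∀ x ∈ l1, x < 10) → (∀ x ∈ l2, x < 10) →
    l1.map Nat.digitChar = l2.map Nat.digitChar → l1 = l2 := by
  intro l1
  induction l1 with
  | nil => intro l2 _ _ h; cases l2 <;> simp_all
  | cons x t ih =>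
    intro l2 h1 h2 h
    cases l2 with
    | nil => simp_all
    | cons y s =>
      simp only [List.map_cons, List.cons.injEq] at h
      have hx := pvDigitChar_inj x y (h1 x (by simp)) (h2 y (by simp)) h.1
      have := ih s (fun z hz => h1 z (by simp [hz])) (fun z hz => h2 z (by simp [hz])) h.2
      simp [hx, this]

lemma pvDash_not_mem_toDigits (n : Nat) : '-' ∉ Nat.toDigits 10 n := by
  rcases Nat.eq_zero_or_pos n with h | h
  · subst h; decide
  · rw [pvToDigits_eq_digits n h]
    simp only [List.mem_reverse, List.mem_map, not_exists, not_and]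
    intro d hd
    have hlt : d < 10 := Nat.digits_lt_base (by norm_num) hd
    interval_cases d <;> decide

lemma pvLt_pow_len_toDigits (n : Nat) : n < 10 ^ (Nat.toDigits 10 n).length := by
  rcases Nat.eq_zero_or_pos n with h | h
  · subst h; decide
  · rw [pvToDigits_eq_digits n h]
    simp only [List.length_reverse, List.length_map]
    exact Nat.lt_base_pow_length_digits (by norm_num)

lemma pvSuffix_iff_mod (a b : Nat) (ha : 0 < a) :
    (Nat.toDigits 10 b <:+ Nat.toDigits 10 a) ↔ a % 10 ^ (Nat.toDigits 10 b).length = b := by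
  rcases Nat.eq_zero_or_pos b with hb | hb
  · subst hb
    have h0 : Nat.toDigits 10 0 = ['0'] := rfl
    rw [h0, pvToDigits_eq_digits a ha, Nat.digits_def' (by norm_num : (1:Nat) < 10) ha]
    simp only [List.map_cons, List.reverse_cons, List.length_cons, List.length_nil, Nat.zero_add,
      pow_one]
    constructor
    · rintro ⟨t, ht⟩
      obtain ⟨-, h2⟩ := List.append_inj' ht rfl
      have hc : Nat.digitChar (a % 10) = '0' := by
        have := h2.symm
        simpa using this
      have h0c : Nat.digitChar (a % 10) = Nat.digitChar 0 := hc
      have := pvDigitChar_inj (a % 10) 0 (Nat.mod_lt a (by norm_num)) (by norm_num) h0c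
      omega
    · intro h
      rw [h]
      exact ⟨((Nat.digits 10 (a / 10)).map Nat.digitChar).reverse, rfl⟩
  · rw [pvToDigits_eq_digits a ha, pvToDigits_eq_digits b hb, List.reverse_suffix,
      List.length_reverse, List.length_map]
    set Da := Nat.digits 10 a with hDa
    set Db := Nat.digits 10 b with hDb
    set d := Db.length with hd
    constructor
    · intro h
      have h1 : Db.map Nat.digitChar = (Da.map Nat.digitChar).take ((Db.map Nat.digitChar).length) :=
        List.prefix_iff_eq_take.mp h
      rw [List.length_map, ← List.map_take] at h1
      have h2 : Db = Da.take d :=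
        pvMap_digitChar_inj Db (Da.take d)
          (fun x hx => Nat.digits_lt_base (by norm_num) hx)
          (fun x hx => Nat.digits_lt_base (by norm_num) (List.mem_of_mem_take hx)) h1
      rw [Nat.self_mod_pow_eq_ofDigits_take d a (by norm_num), ← h2, hDb, Nat.ofDigits_digits]
    · intro h
      have hbd : b < 10 ^ d := by
        have := Nat.lt_base_pow_length_digits (b := 10) (m := b) (by norm_num)
        simpa [hd, hDb] using this
      have hd1 : 1 ≤ d := by
        have hne : Db ≠ [] := Nat.digits_ne_nil_iff_ne_zero.mpr (by omega)
        have := List.length_pos_of_ne_nil hne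
        omega
      have hb1 : 10 ^ (d - 1) ≤ b := by
        have h10 : 10 ^ d ≤ 10 * b := Nat.base_pow_length_digits_le 10 b (by norm_num) (by omega)
        have hp : (10:ℕ) ^ d = 10 * 10 ^ (d - 1) := by
          rw [← pow_succ']
          congr 1
          omega
        omega
      have hba : b ≤ a := by
        have := Nat.mod_le a (10 ^ d)
        omega
      have hda : d ≤ Da.length := by
        by_contra hcon
        push Not at hcon
        have ha1 : a < 10 ^ Da.length := by
          have := Nat.lt_base_pow_length_digits (b := 10) (m := a) (by norm_num)
          simpa [hDa] using this
        have ha2 : a < 10 ^ (d - 1) :=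
          lt_of_lt_of_le ha1 (Nat.pow_le_pow_right (by norm_num) (by omega))
        omega
      have hTlen : (Da.take d).length = d := by
        simp only [List.length_take]
        omega
      have hofT : Nat.ofDigits 10 (Da.take d) = b := by
        have hmod := Nat.self_mod_pow_eq_ofDigits_take d a (by norm_num : 2 ≤ 10)
        rw [← hDa] at hmod
        rw [← hmod]
        exact h
      have hT10 : ∀ x ∈ Da.take d, x < 10 :=
        fun x hx => Nat.digits_lt_base (by norm_num) (List.mem_of_mem_take hx)
      have hTne : Da.take d ≠ [] := by
        intro hc
        rw [hc] at hTlen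
        simp at hTlen
        omega
      have hlast : (Da.take d).getLast hTne ≠ 0 := by
        intro hzero
        have hsplit : Da.take d = (Da.take d).dropLast ++ [(Da.take d).getLast hTne] :=
          (List.dropLast_append_getLast hTne).symm
        have heq : Nat.ofDigits 10 (Da.take d) = Nat.ofDigits 10 ((Da.take d).dropLast) := by
          conv_lhs => rw [hsplit]
          rw [Nat.ofDigits_append, hzero]
          simp
        have hlt : Nat.ofDigits 10 ((Da.take d).dropLast) < 10 ^ ((Da.take d).dropLast).length :=
          Nat.ofDigits_lt_base_pow_length (by norm_num)
            (fun x hx => hT10 x ((List.dropLast_sublist _).subset hx))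
        have hlen' : ((Da.take d).dropLast).length = d - 1 := by
          rw [List.length_dropLast, hTlen]
        rw [hlen'] at hlt
        omega
      have hdig : Db = Da.take d := by
        rw [hDb, ← hofT, Nat.digits_ofDigits 10 (by norm_num) _ hT10 (fun _ => hlast)]
      rw [hdig]
      exact (List.take_prefix d Da).map Nat.digitChar

lemma pvToChars_nonneg (n : Int) (h : 0 ≤ n) :
    PySem.Int.toChars n = Nat.toDigits 10 n.toNat := by
  simp only [PySem.Int.toChars]
  rw [if_neg (by omega)]

lemma pvLenStr_toNat (o : Int) :
    (PySem.Str.len (PySem.Int.toStr o)).toNat = (PySem.Int.toChars o).length := by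
  rw [PySem.Str.len_eq, PySem.Int.toList_toStr]
  exact Int.toNat_natCast _

lemma pvEndswith_eq_mod (e o : Int) (he : 1 ≤ e) (ho : 0 ≤ o) :
    (PySem.Str.endswith (PySem.Int.toStr e) (PySem.Int.toStr o) = true)
      ↔ e % (10 : Int) ^ (PySem.Int.toChars o).length = o := by
  rw [PySem.Str.endswith_eq, PySem.Int.toList_toStr, PySem.Int.toList_toStr,
    PySem.Chars.endswith_iff, pvToChars_nonneg e (by omega), pvToChars_nonneg o ho,
    pvSuffix_iff_mod e.toNat o.toNat (by omega)]
  have he0 : (e.toNat : ℤ) = e := by omega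
  have ho0 : (o.toNat : ℤ) = o := by omega
  constructor
  · intro h
    have hcast := congrArg (fun n : ℕ => (n : ℤ)) h
    push_cast at hcast
    rw [he0, ho0] at hcast
    exact hcast
  · intro h
    have hcast : ((e.toNat % 10 ^ (Nat.toDigits 10 o.toNat).length : ℕ) : ℤ)
        = ((o.toNat : ℕ) : ℤ) := by
      push_cast
      rw [he0, ho0]
      exact h
    exact_mod_cast hcast

lemma pvEndswith_neg (e o : Int) (he : 1 ≤ e) (ho : o < 0) :
    PySem.Str.endswith (PySem.Int.toStr e) (PySem.Int.toStr o) = false := by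
  have hoc : PySem.Int.toChars o = '-' :: Nat.toDigits 10 o.natAbs := by
    simp only [PySem.Int.toChars]
    rw [if_pos ho]
  rw [PySem.Str.endswith_eq, PySem.Int.toList_toStr, PySem.Int.toList_toStr]
  by_contra hne
  have h : PySem.Chars.endswith (PySem.Int.toChars e) (PySem.Int.toChars o) = true := by
    cases hb : PySem.Chars.endswith (PySem.Int.toChars e) (PySem.Int.toChars o)
    · exact absurd hb hne
    · rfl
  rw [PySem.Chars.endswith_iff] at h
  have hmem : '-' ∈ PySem.Int.toChars e := h.subset (by rw [hoc]; simp)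
  rw [pvToChars_nonneg e (by omega)] at hmem
  exact pvDash_not_mem_toDigits e.toNat hmem

lemma pvLt_pow_len_toChars (o : Int) (ho : 0 ≤ o) :
    o < (10 : Int) ^ (PySem.Int.toChars o).length := by
  rw [pvToChars_nonneg o ho]
  have h := pvLt_pow_len_toDigits o.toNat
  have h2 : ((o.toNat : ℕ) : ℤ) < ((10 ^ (Nat.toDigits 10 o.toNat).length : ℕ) : ℤ) := by
    exact_mod_cast h
  push_cast at h2
  omega

/- ---- the per-cell score of A, and the score of one candidate start ---- -/

def pvCell (start idx obs : Int) : Int :=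
  if obs = start + idx then 3
  else if PySem.Str.endswith (PySem.Int.toStr (start + idx)) (PySem.Int.toStr obs) then 1
  else 0

def pvScore (rows : List Int) (start : Int) : Int :=
  ((PySem.List.enumerate rows 0).map (fun p => pvCell start p.1 p.2)).sum

lemma pvCell_nonneg (s i o : Int) : 0 ≤ pvCell s i o := by
  unfold pvCell
  split_ifs <;> omega

lemma pvScore_nonneg (rows : List Int) (s : Int) : 0 ≤ pvScore rows s := by
  apply List.sum_nonneg
  intro x hx
  simp only [List.mem_map] at hx
  obtain ⟨p, -, rfl⟩ := hx
  exact pvCell_nonneg _ _ _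

-- pvCell decomposed the way B's two array updates add it up
lemma pvCell_split (start idx obs : Int) (hs : 1 ≤ start) (hi : 0 ≤ idx) :
    pvCell start idx obs =
      (if 0 ≤ obs ∧ (start + idx) % (10 : Int) ^ (PySem.Int.toChars obs).length = obs then 1 else 0)
      + (if obs = start + idx then 2 else 0) := by
  unfold pvCell
  by_cases hobs : obs = start + idx
  · rw [if_pos hobs, if_pos hobs]
    have h0 : 0 ≤ obs := by omega
    have hlt : obs < (10 : Int) ^ (PySem.Int.toChars obs).length := pvLt_pow_len_toChars obs h0
    rw [if_pos ⟨h0, by rw [← hobs]; exact Int.emod_eq_of_lt h0 hlt⟩]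
    norm_num
  · rw [if_neg hobs, if_neg hobs]
    by_cases ho : 0 ≤ obs
    · by_cases hE : PySem.Str.endswith (PySem.Int.toStr (start + idx)) (PySem.Int.toStr obs) = true
      · rw [if_pos hE, if_pos ⟨ho, (pvEndswith_eq_mod (start + idx) obs (by omega) ho).mp hE⟩]
        norm_num
      · rw [if_neg hE, if_neg]
        · norm_num
        · rintro ⟨-, hm⟩
          exact hE ((pvEndswith_eq_mod (start + idx) obs (by omega) ho).mpr hm)
    · have hF := pvEndswith_neg (start + idx) obs (by omega) (by omega)
      rw [if_neg (by rw [hF]; simp), if_neg (fun h => ho h.1)]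
      norm_num

/- ---- A's two folds ---- -/

lemma pvInnerA (start : Int) : ∀ (E : List (Int × Int)) (acc : Int),
    E.foldl (fun (sc : Int) (p : Int × Int) =>
        if p.2 = start + p.1 then sc + 3
        else if PySem.Str.endswith (PySem.Int.toStr (start + p.1)) (PySem.Int.toStr p.2) then sc + 1
        else sc) acc
      = acc + (E.map (fun p => pvCell start p.1 p.2)).sum := by
  intro E
  induction E with
  | nil => intro acc; simp
  | cons p t ih =>
    intro acc
    simp only [List.foldl_cons, List.map_cons, List.sum_cons]
    rw [ih]
    unfold pvCell
    split_ifs <;> ring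

lemma pvFoldA (f : Int → Int) : ∀ (xs : List Int) (y : Option Int) (v : Int),
    xs.foldl (fun (b : Option Int × Int) (x : Int) => if f x > b.2 then (some x, f x) else b) (y, v)
      = (if v < (xs.map f).foldl max v
            then xs.find? (fun x => f x == (xs.map f).foldl max v)
            else y,
         (xs.map f).foldl max v) := by
  intro xs
  induction xs with
  | nil => intro y v; simp
  | cons x t ih =>
    intro y v
    simp only [List.foldl_cons, List.map_cons]
    by_cases hx : f x > v
    · rw [if_pos hx, ih (some x) (f x)]
      have hmax : max v (f x) = f x := by omega
      rw [hmax]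
      set M := (t.map f).foldl max (f x) with hM
      have hle := (PySem.List.le_foldl_max (t.map f) (f x)).1
      by_cases heq : f x = M
      · rw [if_neg (show ¬ f x < M by omega), if_pos (show v < M by omega),
          List.find?_cons_of_pos (by rw [heq]; simp)]
      · rw [if_pos (show f x < M by omega), if_pos (show v < M by omega),
          List.find?_cons_of_neg (by simp; omega)]
    · rw [if_neg hx, ih y v]
      have hmax : max v (f x) = v := by omega
      rw [hmax]
      set M := (t.map f).foldl max v with hM
      by_cases hlt : v < M
      · rw [if_pos hlt, List.find?_cons_of_neg (by simp; omega), if_pos hlt]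
      · rw [if_neg hlt, if_neg hlt]

lemma pvGetD_modify_add (A : List Int) (i j : Nat) (c : Int) :
    (A.modify i (· + c)).getD j 0 = A.getD j 0 + (if i = j ∧ j < A.length then c else 0) := by
  by_cases hj : j < A.length
  · rw [List.getD_eq_getElem A 0 hj,
      List.getD_eq_getElem _ 0 (by rw [List.length_modify]; exact hj),
      List.getElem_modify]
    by_cases hij : i = j
    · rw [if_pos hij, if_pos ⟨hij, hj⟩]
    · rw [if_neg hij, if_neg (by tauto)]
      omega
  · have hl : (A.modify i (· + c)).length = A.length := List.length_modify _ _ _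
    rw [List.getD_eq_default (A.modify i (· + c)) _ (by rw [hl]; omega),
      List.getD_eq_default A _ (by omega), if_neg (by tauto)]
    omega

lemma pvProg_len (P : List Int) : ∀ (A : List Int),
    (P.foldl (fun (sc : List Int) (start : Int) => sc.modify (start - 1).toNat (· + 1)) A).length
      = A.length := by
  induction P with
  | nil => intro A; rfl
  | cons x t ih => intro A; simp only [List.foldl_cons]; rw [ih, List.length_modify]

lemma pvProg_getD : ∀ (P : List Int), (∀ x ∈ P, 1 ≤ x) → ∀ (A : List Int) (j : Nat), j < A.length →
    (P.foldl (fun (sc : List Int) (start : Int) => sc.modify (start - 1).toNat (· + 1)) A).getD j 0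
      = A.getD j 0 + P.count ((j : Int) + 1) := by
  intro P
  induction P with
  | nil => intro _ A j hj; simp
  | cons x t ih =>
    intro hP A j hj
    have hx : 1 ≤ x := hP x (by simp)
    have hP' : ∀ y ∈ t, 1 ≤ y := fun y hy => hP y (by simp [hy])
    simp only [List.foldl_cons]
    rw [ih hP' _ j (by rw [List.length_modify]; exact hj),
      pvGetD_modify_add, List.count_cons]
    by_cases hxj : x = (j : Int) + 1
    · rw [if_pos ⟨by omega, hj⟩, if_pos (by simp; omega)]
      push_cast
      ring
    · rw [if_neg (by rintro ⟨h1, -⟩; omega), if_neg (by simp; omega)]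
      push_cast
      ring

lemma pvNodup_pyRange_pos (a b s : Int) (hs : 0 < s) : (PySem.List.pyRange a b s).Nodup := by
  rw [PySem.List.pyRange_of_pos a b hs]
  refine List.Nodup.map ?_ (List.nodup_range)
  intro k1 k2 hk
  have h2 : s * (k1 : Int) = s * (k2 : Int) := by
    have hk' : a + s * (k1 : Int) = a + s * (k2 : Int) := hk
    omega
  have h3 := mul_left_cancel₀ (ne_of_gt hs) h2
  exact_mod_cast h3

lemma pvCount_pyRange_pos (a b s x : Int) (hs : 0 < s) :
    (PySem.List.pyRange a b s).count x = if x ∈ PySem.List.pyRange a b s then 1 else 0 := by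
  by_cases h : x ∈ PySem.List.pyRange a b s
  · rw [if_pos h, List.count_eq_one_of_mem (pvNodup_pyRange_pos a b s hs) h]
  · rw [if_neg h, List.count_eq_zero_of_not_mem h]

-- the body of B's row loop, named for the proofs
def pvRowStep (hi : Int) (scores : List Int) (p : Int × Int) : List Int :=
  if p.2 < 0 then scores
  else
    let m : Int := 10 ^ (PySem.Str.len (PySem.Int.toStr p.2)).toNat
    let first := PySem.Int.mod (p.2 - p.1 - 1) m + 1
    let scores1 := (PySem.List.pyRange first (hi + 1) m).foldl
      (fun (sc : List Int) (start : Int) => sc.modify (start - 1).toNat (· + 1)) scores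
    let s := p.2 - p.1
    if 1 ≤ s ∧ s ≤ hi then scores1.modify (s - 1).toNat (· + 2) else scores1

lemma pvRowStep_eq (hi : Int) (scores : List Int) (p : Int × Int) :
    pvRowStep hi scores p =
      if p.2 < 0 then scores
      else
        if 1 ≤ p.2 - p.1 ∧ p.2 - p.1 ≤ hi then
          ((PySem.List.pyRange
              (PySem.Int.mod (p.2 - p.1 - 1) (10 ^ (PySem.Str.len (PySem.Int.toStr p.2)).toNat) + 1)
              (hi + 1) (10 ^ (PySem.Str.len (PySem.Int.toStr p.2)).toNat)).foldl
            (fun (sc : List Int) (start : Int) => sc.modify (start - 1).toNat (· + 1)) scores).modify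
            (p.2 - p.1 - 1).toNat (· + 2)
        else
          (PySem.List.pyRange
              (PySem.Int.mod (p.2 - p.1 - 1) (10 ^ (PySem.Str.len (PySem.Int.toStr p.2)).toNat) + 1)
              (hi + 1) (10 ^ (PySem.Str.len (PySem.Int.toStr p.2)).toNat)).foldl
            (fun (sc : List Int) (start : Int) => sc.modify (start - 1).toNat (· + 1)) scores := rfl

lemma pvRowStep_len (hi : Int) (A : List Int) (p : Int × Int) :
    (pvRowStep hi A p).length = A.length := by
  rw [pvRowStep_eq]
  split_ifs
  · rfl
  · rw [List.length_modify, pvProg_len]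
  · rw [pvProg_len]

lemma pvRowStep_getD (hi : Int) (hhi : 1 ≤ hi) (A : List Int) (hlen : A.length = hi.toNat)
    (p : Int × Int) (hp : 0 ≤ p.1) (j : Nat) (hj : j < hi.toNat) :
    (pvRowStep hi A p).getD j 0 = A.getD j 0 + pvCell ((j : Int) + 1) p.1 p.2 := by
  obtain ⟨idx, obs⟩ := p
  simp only at hp
  rw [pvRowStep_eq, pvCell_split ((j : Int) + 1) idx obs (by omega) hp]
  dsimp only
  by_cases hneg : obs < 0
  · rw [if_pos hneg, if_neg (by rintro ⟨h0, -⟩; omega),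
      if_neg (show ¬ obs = (j : Int) + 1 + idx by omega)]
    omega
  · have hneg' : 0 ≤ obs := by omega
    rw [if_neg hneg]
    set d := (PySem.Str.len (PySem.Int.toStr obs)).toNat with hdd
    have hd : d = (PySem.Int.toChars obs).length := pvLenStr_toNat obs
    have hm0 : (0 : Int) < 10 ^ d := by positivity
    rw [PySem.Int.mod_eq_emod_of_pos hm0]
    set m : Int := 10 ^ d with hm
    rw [← hd, ← hm]
    set r := (obs - idx - 1) % m with hr
    have hr0 : 0 ≤ r := Int.emod_nonneg _ (ne_of_gt hm0)
    have hrm : r < m := Int.emod_lt_of_pos _ hm0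
    have hobs_m : obs < m := by rw [hm, hd]; exact pvLt_pow_len_toChars obs hneg'
    have hP1 : ∀ x ∈ PySem.List.pyRange (r + 1) (hi + 1) m, 1 ≤ x := by
      intro x hx
      rw [PySem.List.mem_pyRange_iff_of_pos hm0] at hx
      omega
    have hrmod : r ≡ obs - idx - 1 [ZMOD m] := by
      rw [hr]
      exact Int.emod_emod_of_dvd _ dvd_rfl
    have hmem_iff : ((j : Int) + 1 ∈ PySem.List.pyRange (r + 1) (hi + 1) m)
        ↔ ((j : Int) + 1 + idx) % m = obs := by
      rw [PySem.List.mem_pyRange_iff_of_pos hm0]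
      constructor
      · rintro ⟨h1, h2, hdvd⟩
        have h4 : (r + 1 : Int) ≡ (j : Int) + 1 [ZMOD m] := Int.modEq_iff_dvd.mpr hdvd
        have h5 : ((j : Int) + 1 + idx) ≡ obs [ZMOD m] := by
          calc ((j : Int) + 1 + idx) = ((j : Int) + 1) + idx := by ring
            _ ≡ (r + 1) + idx [ZMOD m] := h4.symm.add_right idx
            _ = r + (1 + idx) := by ring
            _ ≡ (obs - idx - 1) + (1 + idx) [ZMOD m] := hrmod.add_right _
            _ = obs := by ring
        have h7 : ((j : Int) + 1 + idx) % m = obs % m := h5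
        rw [Int.emod_eq_of_lt hneg' hobs_m] at h7
        exact h7
      · intro hmod
        have h5 : ((j : Int) + 1 + idx) ≡ obs [ZMOD m] := by
          show ((j : Int) + 1 + idx) % m = obs % m
          rw [hmod, Int.emod_eq_of_lt hneg' hobs_m]
        have h4 : ((j : Int) + 1) ≡ r + 1 [ZMOD m] := by
          calc ((j : Int) + 1) = ((j : Int) + 1 + idx) - idx := by ring
            _ ≡ obs - idx [ZMOD m] := h5.sub_right idx
            _ = (obs - idx - 1) + 1 := by ring
            _ ≡ r + 1 [ZMOD m] := hrmod.symm.add_right 1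
        have hdvd : m ∣ ((j : Int) + 1) - (r + 1) := Int.modEq_iff_dvd.mp h4.symm
        refine ⟨?_, by omega, hdvd⟩
        obtain ⟨k, hk⟩ := hdvd
        by_cases hk0 : 0 ≤ k
        · have hpos : 0 ≤ m * k := mul_nonneg hm0.le hk0
          omega
        · have hk1 : k ≤ -1 := by omega
          have hle : m * k ≤ m * (-1) := by
            apply mul_le_mul_of_nonneg_left hk1 hm0.le
          rw [mul_neg_one] at hle
          omega
    have hfold : ((PySem.List.pyRange (r + 1) (hi + 1) m).foldl
          (fun (sc : List Int) (start : Int) => sc.modify (start - 1).toNat (· + 1)) A).getD j 0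
        = A.getD j 0 + ((PySem.List.pyRange (r + 1) (hi + 1) m).count ((j : Int) + 1) : Int) := by
      have := pvProg_getD _ hP1 A j (by omega)
      exact_mod_cast this
    have hcount : (((PySem.List.pyRange (r + 1) (hi + 1) m).count ((j : Int) + 1) : Nat) : Int)
        = (if ((j : Int) + 1 + idx) % m = obs then 1 else 0) := by
      rw [pvCount_pyRange_pos _ _ _ _ hm0]
      by_cases hc : (j : Int) + 1 ∈ PySem.List.pyRange (r + 1) (hi + 1) m
      · rw [if_pos hc, if_pos (hmem_iff.mp hc)]
        norm_num
      · rw [if_neg hc, if_neg (fun hmm => hc (hmem_iff.mpr hmm))]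
        norm_num
    have hflen : ((PySem.List.pyRange (r + 1) (hi + 1) m).foldl
          (fun (sc : List Int) (start : Int) => sc.modify (start - 1).toNat (· + 1)) A).length
        = A.length := pvProg_len _ _
    simp only [hneg', true_and]
    by_cases hcond : 1 ≤ obs - idx ∧ obs - idx ≤ hi
    · rw [if_pos hcond, pvGetD_modify_add, hfold, hcount, hflen]
      by_cases hex : obs = (j : Int) + 1 + idx
      · have hmodc : ((j : Int) + 1 + idx) % m = obs := by
          rw [← hex]
          exact Int.emod_eq_of_lt hneg' hobs_m
        rw [if_pos hmodc, if_pos (show (obs - idx - 1).toNat = j ∧ j < A.length by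
          constructor
          · omega
          · omega), if_pos hex]
        ring
      · have h2 : ¬((obs - idx - 1).toNat = j ∧ j < A.length) := by
          rintro ⟨hc1, -⟩
          omega
        rw [if_neg h2, if_neg hex]
        ring
    · rw [if_neg hcond, hfold, hcount,
        if_neg (show ¬ obs = (j : Int) + 1 + idx by omega)]
      ring

lemma pvBuild_getD (hi : Int) (hhi : 1 ≤ hi) :
    ∀ (E : List (Int × Int)), (∀ p ∈ E, 0 ≤ p.1) → ∀ (A : List Int), A.length = hi.toNat →
      ∀ (j : Nat), j < hi.toNat →
        (E.foldl (pvRowStep hi) A).getD j 0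
          = A.getD j 0 + (E.map (fun p => pvCell ((j : Int) + 1) p.1 p.2)).sum := by
  intro E
  induction E with
  | nil => intro _ A _ j _; simp
  | cons p t ih =>
    intro hE A hlen j hj
    simp only [List.foldl_cons, List.map_cons, List.sum_cons]
    rw [ih (fun q hq => hE q (by simp [hq])) _ (by rw [pvRowStep_len]; exact hlen) j hj,
      pvRowStep_getD hi hhi A hlen p (hE p (by simp)) j hj]
    ring

lemma pvBuild_len (hi : Int) : ∀ (E : List (Int × Int)) (A : List Int),
    (E.foldl (pvRowStep hi) A).length = A.length := by
  intro E
  induction E with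
  | nil => intro A; rfl
  | cons p t ih =>
    intro A
    simp only [List.foldl_cons]
    rw [ih, pvRowStep_len]

lemma pvEnumerate_fst_nonneg (rows : List Int) (p : Int × Int)
    (hp : p ∈ PySem.List.enumerate rows 0) : 0 ≤ p.1 := by
  rw [PySem.List.mem_enumerate_iff] at hp
  obtain ⟨k, hk, rfl⟩ := hp
  show (0 : Int) ≤ 0 + (k : Int)
  omega

lemma pvScores_eq (hi : Int) (hhi : 1 ≤ hi) (rows : List Int) :
    (PySem.List.enumerate rows 0).foldl (pvRowStep hi) (List.replicate hi.toNat 0)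
      = (PySem.List.pyRange 1 (hi + 1) 1).map (pvScore rows) := by
  have hlenL : (List.replicate hi.toNat (0 : Int)).length = hi.toNat := List.length_replicate
  have hlenF : ((PySem.List.enumerate rows 0).foldl (pvRowStep hi)
      (List.replicate hi.toNat 0)).length = hi.toNat := by
    rw [pvBuild_len, hlenL]
  apply List.ext_getElem?
  intro j
  by_cases hj : j < hi.toNat
  · rw [List.getElem?_eq_getElem (by rw [hlenF]; exact hj), List.getElem?_map,
      PySem.List.getElem?_pyRange_one, if_pos (by omega : j < (hi + 1 - 1).toNat)]
    have hg := pvBuild_getD hi hhi (PySem.List.enumerate rows 0)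
      (fun p hp => pvEnumerate_fst_nonneg rows p hp) (List.replicate hi.toNat 0) hlenL j hj
    rw [List.getD_eq_getElem _ 0 (by rw [hlenF]; exact hj)] at hg
    rw [hg]
    have hz : (List.replicate hi.toNat (0 : Int)).getD j 0 = 0 := by
      rw [List.getD_eq_getElem _ 0 (by rw [hlenL]; exact hj), List.getElem_replicate]
    rw [hz]
    simp only [Option.map_some]
    congr 1
    rw [show (1 : Int) + (j : Int) = (j : Int) + 1 by ring]
    unfold pvScore
    ring
  · rw [List.getElem?_eq_none (by rw [hlenF]; omega),
      List.getElem?_eq_none (by rw [List.length_map, PySem.List.length_pyRange_one]; omega)]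

/- ---- argmax glue ---- -/

lemma pvFind_map_index (g : Int → Int) : ∀ (l : List Int) (v : Int),
    l.find? (fun x => g x == v)
      = (PySem.List.index? (l.map g) v).bind (fun i => l[i]?) := by
  intro l
  induction l with
  | nil => intro v; simp [PySem.List.index?_eq_idxOf?]
  | cons x t ih =>
    intro v
    by_cases hx : g x = v
    · rw [List.find?_cons_of_pos (by simp [hx]), List.map_cons, hx,
        PySem.List.index?_cons_self]
      rfl
    · rw [List.find?_cons_of_neg (by simp [hx]), List.map_cons,
        PySem.List.index?_cons_of_ne _ hx, ih v]
      cases h : PySem.List.index? (t.map g) v with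
      | none => rfl
      | some i => simp

lemma pvIndex_lt_length (S : List Int) (v : Int) (i : Nat)
    (h : PySem.List.index? S v = some i) : i < S.length := by
  rw [PySem.List.index?_eq_some_iff] at h
  obtain ⟨pre, suf, rfl, rfl, -⟩ := h
  simp only [List.length_append, List.length_cons]
  omega

-- ===== VERDICT (by name: the statement is the Claim_ definition above) =====

theorem infer_frame_start_spec : Claim_equal_infer_frame_start := by
  intro observed_ranks row_count max_rank _hdom
  unfold Spec_infer_frame_start infer_frame_start infer_frame_start_alt
  by_cases hnil : observed_ranks = []
  · rw [if_pos hnil, if_pos hnil]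
  · rw [if_neg hnil, if_neg hnil]
    dsimp only
    set rows := PySem.List.slice observed_ranks none (some row_count) with hrows
    set H := max_rank - row_count + 1 with hH
    rw [show max_rank - row_count + 2 = H + 1 by omega]
    by_cases hlt : H < 1
    · rw [if_pos hlt, PySem.List.pyRange_one_eq_nil (by omega)]
      rfl
    · push Not at hlt
      rw [if_neg (not_lt.mpr hlt)]
      have hstep : (fun (best : Option Int × Int) (start : Int) =>
          if (PySem.List.enumerate rows 0).foldl (fun (sc : Int) (p : Int × Int) =>
              if p.2 = start + p.1 then sc + 3
              else if PySem.Str.endswith (PySem.Int.toStr (start + p.1)) (PySem.Int.toStr p.2) then sc + 1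
              else sc) 0 > best.2
          then (some start, (PySem.List.enumerate rows 0).foldl (fun (sc : Int) (p : Int × Int) =>
              if p.2 = start + p.1 then sc + 3
              else if PySem.Str.endswith (PySem.Int.toStr (start + p.1)) (PySem.Int.toStr p.2) then sc + 1
              else sc) 0)
          else best)
          = (fun (b : Option Int × Int) (x : Int) =>
              if pvScore rows x > b.2 then (some x, pvScore rows x) else b) := by
        funext b x
        rw [pvInnerA x (PySem.List.enumerate rows 0) 0, zero_add]
        rfl
      rw [hstep, pvFoldA (pvScore rows) (PySem.List.pyRange 1 (H + 1) 1) none (-1)]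
      have hrowfun : (fun (scores : List Int) (p : Int × Int) =>
          if p.2 < 0 then scores
          else
            if 1 ≤ p.2 - p.1 ∧ p.2 - p.1 ≤ H then
              ((PySem.List.pyRange
                  (PySem.Int.mod (p.2 - p.1 - 1) (10 ^ (PySem.Str.len (PySem.Int.toStr p.2)).toNat) + 1)
                  (H + 1) (10 ^ (PySem.Str.len (PySem.Int.toStr p.2)).toNat)).foldl
                (fun (sc : List Int) (start : Int) => sc.modify (start - 1).toNat (· + 1)) scores).modify
                (p.2 - p.1 - 1).toNat (· + 2)
            else
              (PySem.List.pyRange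
                  (PySem.Int.mod (p.2 - p.1 - 1) (10 ^ (PySem.Str.len (PySem.Int.toStr p.2)).toNat) + 1)
                  (H + 1) (10 ^ (PySem.Str.len (PySem.Int.toStr p.2)).toNat)).foldl
                (fun (sc : List Int) (start : Int) => sc.modify (start - 1).toNat (· + 1)) scores)
          = pvRowStep H := by
        funext sc p
        rw [pvRowStep_eq]
      rw [hrowfun, pvScores_eq H hlt rows]
      set f := pvScore rows with hf
      have hL : PySem.List.pyRange 1 (H + 1) 1 = 1 :: PySem.List.pyRange 2 (H + 1) 1 := by
        rw [PySem.List.pyRange_one_cons (by omega)]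
        norm_num
      rw [hL]
      simp only [List.map_cons]
      have hf1 : (0 : Int) ≤ f 1 := pvScore_nonneg rows 1
      have hM : (List.foldl max (-1) (f 1 :: List.map f (PySem.List.pyRange 2 (H + 1) 1)))
          = (List.map f (PySem.List.pyRange 2 (H + 1) 1)).foldl max (f 1) := by
        simp only [List.foldl_cons]
        rw [max_eq_right (by omega : (-1 : Int) ≤ f 1)]
      rw [hM, PySem.List.max?_id_cons]
      have hM0 : (0 : Int) ≤ (List.map f (PySem.List.pyRange 2 (H + 1) 1)).foldl max (f 1) := by
        have := (PySem.List.le_foldl_max (List.map f (PySem.List.pyRange 2 (H + 1) 1)) (f 1)).1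
        omega
      have hMmem : (List.map f (PySem.List.pyRange 2 (H + 1) 1)).foldl max (f 1)
          ∈ f 1 :: List.map f (PySem.List.pyRange 2 (H + 1) 1) := by
        rcases PySem.List.foldl_max_mem (List.map f (PySem.List.pyRange 2 (H + 1) 1)) (f 1) with h | h
        · rw [h]; exact List.mem_cons_self
        · exact List.mem_cons_of_mem _ h
      obtain ⟨i, hidx⟩ : ∃ i, PySem.List.index? (f 1 :: List.map f (PySem.List.pyRange 2 (H + 1) 1))
          ((List.map f (PySem.List.pyRange 2 (H + 1) 1)).foldl max (f 1)) = some i := by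
        have h := (PySem.List.index?_isSome_iff _ _).mpr hMmem
        exact Option.isSome_iff_exists.mp h
      have hilen := pvIndex_lt_length _ _ _ hidx
      rw [if_pos (by omega : (-1 : Int) < (List.map f (PySem.List.pyRange 2 (H + 1) 1)).foldl max (f 1))]
      dsimp only
      rw [pvFind_map_index f (1 :: PySem.List.pyRange 2 (H + 1) 1)
          ((List.map f (PySem.List.pyRange 2 (H + 1) 1)).foldl max (f 1))]
      simp only [List.map_cons]
      rw [hidx]
      simp only [Option.bind_some]
      rw [← hL, PySem.List.getElem?_pyRange_one]
      have hiH : i < (H + 1 - 1).toNat := by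
        simp only [List.length_cons, List.length_map, PySem.List.length_pyRange_one] at hilen
        omega
      rw [if_pos hiH]
      rw [show (1 : Int) + (i : Int) = (i : Int) + 1 by ring]
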